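-- pv_equiv track=rewrite | github.com/gh0stintheshe11/LeetCode-Solutions | solutions/find-the-string-with-lcp/Python3.py | checkNewLCP
-- ===== SOURCE A (Python) =====
-- from typing import List
--
-- def checkNewLCP(lcp: List[List[int]], output: List[str]) -> bool:
--     n = len(output)
--     for row_index in range(n):
--         for col_index in range(n):
--             prev_val = lcp[row_index+1][col_index+1] if (row_index+1 < n and col_index+1 < n) else 0
--             expected_val = -1
--             if output[col_index] == output[row_index]:
--                 expected_val = prev_val + 1
--             else:
--                 expected_val = 0
--             if lcp[row_index][col_index] != expected_val:
--                 return False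
--     return True
-- ===== SOURCE B (Python) =====
-- def checkNewLCP(lcp, output):
--     n = len(output)
--     # Reconstruct the LCP table from output alone, bottom-up (row n is all-zero padding),
--     # then compare it against lcp cell by cell in forward order.
--     row = [0] * (n + 1)
--     table = [row]
--     for i in range(n - 1, -1, -1):
--         row = [(row[j + 1] + 1 if output[i] == output[j] else 0) for j in range(n)] + [0]
--         table.append(row)
--     table.reverse()
--     for i in range(n):
--         for j in range(n):
--             if lcp[i][j] != table[i][j]:
--                 return False
--     return True
-- ===== Notes on version B (the rewrite author's own statement) =====
-- stated objective: alternative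
-- what changed: Instead of checking each lcp cell against an expected value derived from lcp's own diagonal neighbour, B first reconstructs the entire expected LCP table bottom-up from output alone and then compares it to lcp in a separate forward pass.
-- outside the precondition, e.g. on checkNewLCP([[3, 9], [5, 1]], ['a', 'b', 'c']): A returns False, B returns False
import Mathlib
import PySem

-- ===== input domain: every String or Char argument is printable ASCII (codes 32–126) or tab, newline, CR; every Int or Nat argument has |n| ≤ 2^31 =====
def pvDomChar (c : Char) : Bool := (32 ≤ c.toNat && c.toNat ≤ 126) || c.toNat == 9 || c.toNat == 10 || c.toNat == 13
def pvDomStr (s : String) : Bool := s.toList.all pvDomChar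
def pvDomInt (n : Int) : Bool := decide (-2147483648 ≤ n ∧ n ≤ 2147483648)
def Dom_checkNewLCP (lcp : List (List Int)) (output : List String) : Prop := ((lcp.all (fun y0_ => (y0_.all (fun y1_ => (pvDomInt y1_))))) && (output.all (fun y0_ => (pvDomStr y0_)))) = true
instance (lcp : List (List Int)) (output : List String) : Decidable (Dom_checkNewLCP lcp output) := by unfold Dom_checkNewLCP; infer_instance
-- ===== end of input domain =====

-- B rebuilds the expected LCP table from `output` alone (bottom-up) and then compares it
-- against `lcp`; same asymptotic cost as A, objective: alternative decomposition.

-- ===== PORT A =====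
-- lcp[i][j] for Nat indices; out of range Python raises IndexError (excluded by Pre_), here the default is returned
def aGet (lcp : List (List Int)) (i j : Nat) : Int :=
  PySem.List.pyGetD (PySem.List.pyGetD lcp (i : Int) []) (j : Int) 0

def checkNewLCP (lcp : List (List Int)) (output : List String) : Bool :=
  let n := output.length
  -- 'return False' inside the double for-loop = short-circuiting `all` over both ranges
  (List.range n).all fun i =>
    (List.range n).all fun j =>
      let prev := if i + 1 < n ∧ j + 1 < n then aGet lcp (i+1) (j+1) else 0
      let expected :=
        if PySem.List.pyGetD output (j : Int) "" == PySem.List.pyGetD output (i : Int) ""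
        then prev + 1 else 0
      aGet lcp i j == expected

-- ===== PORT B =====
-- one row of the reconstructed table (n entries computed from the row below, plus the 0 padding)
def bRow (output : List String) (n i : Nat) (next : List Int) : List Int :=
  ((List.range n).map fun (j : Nat) =>
    if PySem.List.pyGetD output (i : Int) "" == PySem.List.pyGetD output (j : Int) ""
    then PySem.List.pyGetD next ((j : Int) + 1) 0 + 1 else 0) ++ [0]

-- rows n, n-1, …, n-k built bottom-up; consing on the front = Python's append-then-reverse
def bTable (output : List String) (n : Nat) : Nat → List (List Int)
  | 0 => [List.replicate (n + 1) 0]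
  | k + 1 => bRow output n (n - (k + 1)) ((bTable output n k).headD []) :: bTable output n k

def checkNewLCP_alt (lcp : List (List Int)) (output : List String) : Bool :=
  let n := output.length
  let table := bTable output n n
  (List.range n).all fun i =>
    (List.range n).all fun j =>
      PySem.List.pyGetD (PySem.List.pyGetD lcp (i : Int) []) (j : Int) 0
        == PySem.List.pyGetD (PySem.List.pyGetD table (i : Int) []) (j : Int) 0

-- ===== PRECONDITION & SPEC =====
-- Pre_ admits every lcp of full n×n shape, plus malformed matrices whose first scanned cell
-- (0,0) already fails both programs' first test (lcp[0][0] ≠ lcp[1][1]+1 and lcp[0][0] ≠ n),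
-- so both return False before any out-of-range access; other malformed matrices are excluded:
-- there Python A (or B) raises IndexError, except when a later cell mismatch happens to return
-- False first (such an excluded-but-returning input is cited in claim.json).
def Pre_checkNewLCP (lcp : List (List Int)) (output : List String) : Prop :=
  (output.length ≤ lcp.length ∧ ∀ row ∈ lcp.take output.length, output.length ≤ row.length)
  ∨ (2 ≤ output.length ∧ 2 ≤ lcp.length ∧ 1 ≤ (lcp.getD 0 []).length ∧ 2 ≤ (lcp.getD 1 []).length
      ∧ (lcp.getD 0 []).getD 0 0 ≠ (lcp.getD 1 []).getD 1 0 + 1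
      ∧ (lcp.getD 0 []).getD 0 0 ≠ (output.length : Int))
instance (lcp : List (List Int)) (output : List String) : Decidable (Pre_checkNewLCP lcp output) := by unfold Pre_checkNewLCP; infer_instance

def pvWitness_checkNewLCP : List (List Int) × List String := ([[1, 0], [0, 1]], ["a", "b"])

def Spec_checkNewLCP (lcp : List (List Int)) (output : List String) (out : Bool) : Prop := out = checkNewLCP_alt lcp output
instance (lcp : List (List Int)) (output : List String) (out : Bool) : Decidable (Spec_checkNewLCP lcp output out) := by unfold Spec_checkNewLCP; infer_instance

-- ===== CLAIM (what is proved, stated in full; the proofs are below) =====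
def Claim_equal_checkNewLCP : Prop := ∀ (lcp : List (List Int)) (output : List String), Dom_checkNewLCP lcp output → Pre_checkNewLCP lcp output → Spec_checkNewLCP lcp output (checkNewLCP lcp output)

-- ===== LEMMAS AND PROOFS =====

-- the mathematical reconstructed-LCP function both programs compute against
def Lspec (output : List String) : Nat → Nat → Int
  | i, j =>
    if i < output.length ∧ j < output.length then
      (if output.getD i "" = output.getD j "" then Lspec output (i + 1) (j + 1) + 1 else 0)
    else 0
termination_by i _ => output.length - i
decreasing_by omega

theorem Lspec_out (output : List String) (i j : Nat) (h : ¬ (i < output.length ∧ j < output.length)) :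
    Lspec output i j = 0 := by rw [Lspec]; simp [h]

theorem Lspec_in (output : List String) (i j : Nat) (h : i < output.length ∧ j < output.length) :
    Lspec output i j =
      (if output.getD i "" = output.getD j "" then Lspec output (i + 1) (j + 1) + 1 else 0) := by
  rw [Lspec]; simp [h]


-- from A's per-cell equations, agreement with Lspec follows by downward induction on n - i
theorem cells_to_Lspec (lcp : List (List Int)) (output : List String)
    (h : ∀ i j, i < output.length → j < output.length →
      aGet lcp i j = (if output.getD j "" = output.getD i "" then
        (if i + 1 < output.length ∧ j + 1 < output.length then aGet lcp (i+1) (j+1) else 0) + 1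
        else 0)) :
    ∀ m i j, output.length - i ≤ m → i < output.length → j < output.length →
      aGet lcp i j = Lspec output i j := by
  intro m
  induction m with
  | zero => intro i j hm hi hj; omega
  | succ m ih =>
    intro i j hm hi hj
    rw [h i j hi hj, Lspec_in _ _ _ ⟨hi, hj⟩]
    by_cases he : output.getD i "" = output.getD j ""
    · rw [if_pos he.symm, if_pos he]
      by_cases hin : i + 1 < output.length ∧ j + 1 < output.length
      · rw [if_pos hin, ih (i+1) (j+1) (by omega) hin.1 hin.2]
      · rw [if_neg hin, Lspec_out _ _ _ hin]
    · rw [if_neg (fun hx => he hx.symm), if_neg he]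

theorem checkNewLCP_eq_true_iff (lcp : List (List Int)) (output : List String) :
    checkNewLCP lcp output = true ↔
      ∀ i j, i < output.length → j < output.length →
        aGet lcp i j = Lspec output i j := by
  constructor
  · intro h i j hi hj
    have hc : ∀ i j, i < output.length → j < output.length →
        aGet lcp i j = (if output.getD j "" = output.getD i "" then
          (if i + 1 < output.length ∧ j + 1 < output.length then aGet lcp (i+1) (j+1) else 0) + 1
          else 0) := by
      intro i j hi hj
      simp only [checkNewLCP, List.all_eq_true, List.mem_range] at h
      have := h i hi j hj
      simpa [PySem.List.pyGetD_natCast, beq_iff_eq] using this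
    exact cells_to_Lspec lcp output hc (output.length - i) i j le_rfl hi hj
  · intro h
    simp only [checkNewLCP, List.all_eq_true, List.mem_range]
    intro i hi j hj
    simp only [PySem.List.pyGetD_natCast, beq_iff_eq]
    rw [h i j hi hj, Lspec_in _ _ _ ⟨hi, hj⟩]
    by_cases he : output.getD i "" = output.getD j ""
    · rw [if_pos he, if_pos he.symm]
      by_cases hin : i + 1 < output.length ∧ j + 1 < output.length
      · rw [if_pos hin, h (i+1) (j+1) hin.1 hin.2]
      · rw [if_neg hin, Lspec_out _ _ _ hin]
    · rw [if_neg he, if_neg (fun hx => he hx.symm)]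

-- the head row of bTable output n k is row n-k of the reconstructed table
theorem bTable_head (output : List String) (hn : (n : Nat) = output.length) :
    ∀ k, k ≤ n → ∀ j : Nat,
      PySem.List.pyGetD ((bTable output n k).headD []) (j : Int) 0 = Lspec output (n - k) j := by
  subst hn
  intro k
  induction k with
  | zero =>
    intro _ j
    simp only [bTable, List.headD_cons, PySem.List.pyGetD_natCast]
    rw [Lspec_out _ _ _ (by omega)]
    simp [List.getD]
  | succ k ih =>
    intro hk j
    rw [show bTable output output.length (k+1)
        = bRow output output.length (output.length - (k+1)) ((bTable output output.length k).headD [])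
            :: bTable output output.length k from rfl,
      List.headD_cons, bRow, PySem.List.pyGetD_natCast]
    by_cases hj : j < output.length
    · rw [List.getD_eq_getElem?_getD, List.getElem?_append_left (by simp [hj]),
        List.getElem?_map, List.getElem?_range hj, Option.map_some, Option.getD_some,
        show ((j : Int) + 1) = (((j + 1 : Nat)) : Int) from by push_cast; ring,
        ih (by omega) (j + 1),
        show output.length - k = (output.length - (k + 1)) + 1 from by omega]
      conv_rhs => rw [Lspec_in _ _ _ ⟨by omega, hj⟩]
      simp only [PySem.List.pyGetD_natCast, beq_iff_eq]
    · rw [Lspec_out _ _ _ (by omega)]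
      rcases Nat.lt_or_ge j (output.length + 1) with hj2 | hj2
      · have hjn : j = output.length := by omega
        subst hjn
        rw [List.getD_eq_getElem?_getD, List.getElem?_append_right (by simp)]
        simp
      · rw [List.getD_eq_getElem?_getD, List.getElem?_eq_none (by simp; omega)]
        rfl

-- indexing into the accumulated table steps back to a later head
theorem bTable_getD (output : List String) (n : Nat) :
    ∀ m k, m ≤ k → (bTable output n k).getD m [] = (bTable output n (k - m)).headD [] := by
  intro m
  induction m with
  | zero =>
    intro k _
    rw [Nat.sub_zero]
    cases hk : bTable output n k with
    | nil => simp
    | cons a t => simp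
  | succ m ih =>
    intro k hk
    obtain ⟨k', rfl⟩ : ∃ k', k = k' + 1 := ⟨k - 1, by omega⟩
    rw [show bTable output n (k' + 1)
        = bRow output n (n - (k' + 1)) ((bTable output n k').headD []) :: bTable output n k' from rfl,
      List.getD_cons_succ, ih k' (by omega), show k' + 1 - (m + 1) = k' - m from by omega]

theorem checkNewLCP_alt_eq_true_iff (lcp : List (List Int)) (output : List String) :
    checkNewLCP_alt lcp output = true ↔
      ∀ i j, i < output.length → j < output.length →
        aGet lcp i j = Lspec output i j := by
  have htab : ∀ i j : Nat, i < output.length →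
      PySem.List.pyGetD (PySem.List.pyGetD (bTable output output.length output.length) (i : Int) []) (j : Int) 0
        = Lspec output i j := by
    intro i j hi
    simp only [PySem.List.pyGetD_natCast]
    rw [bTable_getD output output.length i output.length (by omega),
      ← PySem.List.pyGetD_natCast, bTable_head output rfl (output.length - i) (by omega) j,
      show output.length - (output.length - i) = i from by omega]
  simp only [checkNewLCP_alt, List.all_eq_true, List.mem_range, aGet]
  constructor
  · intro h i j hi hj
    have := h i hi j hj
    rw [htab i j hi] at this
    exact beq_iff_eq.mp this
  · intro h i hi j hj
    rw [htab i j hi]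
    exact beq_iff_eq.mpr (h i j hi hj)

-- ===== VERDICT (by name: the statement is the Claim_ definition above) =====
theorem checkNewLCP_spec : Claim_equal_checkNewLCP := by
  intro lcp output _ _
  unfold Spec_checkNewLCP
  have h := (checkNewLCP_eq_true_iff lcp output).trans
    (checkNewLCP_alt_eq_true_iff lcp output).symm
  exact Bool.coe_iff_coe.mp h
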